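-- pv_equiv track=rewrite | github.com/oniroman/fr | text-blocks.py | prettier
-- ===== SOURCE A (Python) =====
-- def prettier(list_of_things):
--     lines = ""
--     if len(list_of_things) > 20:
--         for i, x in enumerate(list_of_things):
--             if i < 9:
--                 temp = ' ' + str(i + 1) + '. ' + x
--             else:
--                 temp = str(i + 1) + '. ' + x
--             if len(temp) < 15:
--                 temp = temp + (15 - len(temp)) * ' '
--             lines = lines + temp
--             if (i + 1) % 10 == 0:
--                 lines = lines + '\n'
--     else:
--         for i, x in enumerate(list_of_things):
--             lines = lines + '\n' + str(i) + ' ' + x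
--     return lines
-- ===== SOURCE B (Python) =====
-- def _token(i, x):
--     t = (' ' if i < 9 else '') + str(i + 1) + '. ' + x
--     return t + ' ' * (15 - len(t))
--
--
-- def prettier(list_of_things):
--     if len(list_of_things) > 20:
--         out = []
--         rest = list_of_things
--         start = 0
--         while rest:
--             chunk, rest = rest[:10], rest[10:]
--             row = ''.join(_token(start + j, x) for j, x in enumerate(chunk))
--             if len(chunk) == 10:
--                 row += '\n'
--             out.append(row)
--             start += 10
--         return ''.join(out)
--     return ''.join('\n' + str(i) + ' ' + x for i, x in enumerate(list_of_things))
-- ===== Notes on version B (the rewrite author's own statement) =====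
-- stated objective: alternative
-- what changed: B replaces A's single element-wise fold with a mutating string accumulator by a row-wise decomposition: the list is consumed in chunks of 10, each row is built as a join of unconditionally padded tokens (pad and leading space folded into one token helper) with the newline decided once per row from the chunk length, and the rows are joined; the short branch becomes a join over a generator instead of an accumulating loop.
import Mathlib
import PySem

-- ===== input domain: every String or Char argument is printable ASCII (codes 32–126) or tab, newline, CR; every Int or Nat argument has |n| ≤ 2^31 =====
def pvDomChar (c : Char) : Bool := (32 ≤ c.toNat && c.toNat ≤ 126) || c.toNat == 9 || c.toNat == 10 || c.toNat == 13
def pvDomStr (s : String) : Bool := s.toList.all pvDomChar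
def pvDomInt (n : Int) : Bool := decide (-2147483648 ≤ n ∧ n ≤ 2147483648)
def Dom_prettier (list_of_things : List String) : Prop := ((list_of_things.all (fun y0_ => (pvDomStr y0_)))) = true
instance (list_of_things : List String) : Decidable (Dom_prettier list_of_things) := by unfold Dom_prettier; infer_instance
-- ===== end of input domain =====

-- B re-decomposes A's element-wise accumulating loop into a row-wise pass: chunks of 10,
-- per-row join of unconditionally padded tokens, newline decided once per row (objective: alternative).

-- ===== PORT A =====
-- A's loop body for the long branch: build temp (leading space for i < 9), pad to 15 if short.
-- '(15 - len(temp)) * " "' is ported as String.ofList (PySem.List.pyRepeat [' '] _), exact for int*str.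
def pvTokA (i : Int) (x : String) : String :=
  let temp : String :=
    if i < 9 then " " ++ PySem.Int.toStr (i + 1) ++ ". " ++ x
    else PySem.Int.toStr (i + 1) ++ ". " ++ x
  if PySem.Str.len temp < 15 then
    temp ++ String.ofList (PySem.List.pyRepeat [' '] (15 - (PySem.Str.len temp : Int)))
  else temp

def prettier (list_of_things : List String) : String :=
  if list_of_things.length > 20 then
    (PySem.List.enumerate list_of_things).foldl
      (fun lines p =>
        let lines := lines ++ pvTokA p.1 p.2
        if PySem.Int.mod (p.1 + 1) 10 == 0 then lines ++ "\n" else lines) ""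
  else
    (PySem.List.enumerate list_of_things).foldl
      (fun lines p => lines ++ "\n" ++ PySem.Int.toStr p.1 ++ " " ++ p.2) ""

-- ===== PORT B =====
-- B's token: leading space and padding folded in unconditionally ('' * negative = '').
def pvToken (i : Int) (x : String) : String :=
  let t := (if i < 9 then " " else "") ++ PySem.Int.toStr (i + 1) ++ ". " ++ x
  t ++ String.ofList (PySem.List.pyRepeat [' '] (15 - (PySem.Str.len t : Int)))

-- B's while-loop over the remaining list: one row per chunk of 10.
def pvRows (start : Int) (l : List String) : String :=
  if h : l = [] then ""
  else
    let chunk := l.take 10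
    let row := PySem.Str.join ""
      ((PySem.List.enumerate chunk).map (fun p => pvToken (start + p.1) p.2))
    let row := if chunk.length = 10 then row ++ "\n" else row
    row ++ pvRows (start + 10) (l.drop 10)
termination_by l.length
decreasing_by
  simp only [List.length_drop]
  have : l.length ≠ 0 := fun hh => h (List.eq_nil_of_length_eq_zero hh)
  omega

def prettier_alt (list_of_things : List String) : String :=
  if list_of_things.length > 20 then pvRows 0 list_of_things
  else
    PySem.Str.join ""
      ((PySem.List.enumerate list_of_things).map
        (fun p => "\n" ++ PySem.Int.toStr p.1 ++ " " ++ p.2))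

-- ===== PRECONDITION & SPEC =====
def Spec_prettier (list_of_things : List String) (out : String) : Prop := out = prettier_alt list_of_things
instance (list_of_things : List String) (out : String) : Decidable (Spec_prettier list_of_things out) := by unfold Spec_prettier; infer_instance

-- ===== CLAIM (what is proved, stated in full; the proofs are below) =====
def Claim_equal_prettier : Prop := ∀ (list_of_things : List String), Dom_prettier list_of_things → Spec_prettier list_of_things (prettier list_of_things)

-- ===== LEMMAS AND PROOFS =====

lemma pv_join0_nil : PySem.Str.join "" ([] : List String) = "" := by
  rw [← String.toList_inj]
  simp [PySem.Str.toList_join, PySem.Chars.join_nil]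

lemma pv_join0_cons (a : String) (l : List String) :
    PySem.Str.join "" (a :: l) = a ++ PySem.Str.join "" l := by
  cases l with
  | nil =>
    rw [pv_join0_nil, String.append_empty, ← String.toList_inj]
    simp [PySem.Str.toList_join, PySem.Chars.join_singleton]
  | cons b m =>
    rw [← String.toList_inj]
    simp [PySem.Str.toList_join, PySem.Chars.join_cons_cons]

lemma pv_join0_append (l m : List String) :
    PySem.Str.join "" (l ++ m) = PySem.Str.join "" l ++ PySem.Str.join "" m := by
  induction l with
  | nil => simp [pv_join0_nil, String.empty_append]
  | cons a l ih => simp [pv_join0_cons, ih, String.append_assoc]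

lemma pv_foldl_append_join (g : Int × String → String) (L : List (Int × String)) (acc : String) :
    L.foldl (fun s p => s ++ g p) acc = acc ++ PySem.Str.join "" (L.map g) := by
  induction L generalizing acc with
  | nil => simp [pv_join0_nil, String.append_empty]
  | cons a L ih => simp [pv_join0_cons, ih, String.append_assoc]

lemma pv_pad_eq (t : String) :
    (if PySem.Str.len t < 15 then
        t ++ String.ofList (PySem.List.pyRepeat [' '] (15 - (PySem.Str.len t : Int)))
      else t)
    = t ++ String.ofList (PySem.List.pyRepeat [' '] (15 - (PySem.Str.len t : Int))) := by
  by_cases hlen : PySem.Str.len t < 15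
  · rw [if_pos hlen]
  · rw [if_neg hlen, PySem.List.pyRepeat_singleton,
      show (15 - (PySem.Str.len t : Int)).toNat = 0 by omega]
    rw [show String.ofList (List.replicate 0 ' ') = "" from rfl, String.append_empty]

lemma pv_tok_eq (i : Int) (x : String) : pvTokA i x = pvToken i x := by
  simp only [pvTokA, pvToken]
  by_cases h9 : i < 9
  · simp only [h9, if_true]
    exact pv_pad_eq _
  · simp only [h9, if_false, String.empty_append]
    exact pv_pad_eq _

-- newline marker attached to each element in A's loop
def pvNl (i : Int) : String := if PySem.Int.mod (i + 1) 10 == 0 then "\n" else ""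

lemma pv_stepA_eq :
    (fun (lines : String) (p : Int × String) =>
        let lines := lines ++ pvTokA p.1 p.2
        if PySem.Int.mod (p.1 + 1) 10 == 0 then lines ++ "\n" else lines)
      = fun (s : String) (p : Int × String) => s ++ (pvToken p.1 p.2 ++ pvNl p.1) := by
  funext s p
  simp only [pv_tok_eq]
  split <;> rename_i h
  · have hd : (10:Int) ∣ (p.1 + 1) :=
      (PySem.Int.mod_eq_zero_iff_dvd _ _).1 (by simpa using h)
    simp [pvNl, hd, String.append_assoc]
  · have hd : ¬ (10:Int) ∣ (p.1 + 1) := by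
      simpa [PySem.Int.mod_eq_zero_iff_dvd] using h
    simp [pvNl, hd, String.append_assoc, String.append_empty]

lemma pv_stepS_eq :
    (fun (lines : String) (p : Int × String) => lines ++ "\n" ++ PySem.Int.toStr p.1 ++ " " ++ p.2)
      = fun (s : String) (p : Int × String) => s ++ ("\n" ++ PySem.Int.toStr p.1 ++ " " ++ p.2) := by
  funext s p
  simp [String.append_assoc]

lemma pv_enum_shift (xs : List String) (t : Int) :
    ∀ s : Int, PySem.List.enumerate xs (t + s)
      = (PySem.List.enumerate xs s).map (fun p => (t + p.1, p.2)) := by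
  induction xs with
  | nil => intro s; simp [PySem.List.enumerate_nil]
  | cons a xs ih =>
    intro s
    rw [PySem.List.enumerate_cons, PySem.List.enumerate_cons, List.map_cons,
      show t + s + 1 = t + (s + 1) by ring, ih (s + 1)]

lemma pv_nl_small (start j : Int) (hs : PySem.Int.mod start 10 = 0)
    (h0 : 0 ≤ j) (h9 : j < 9) : pvNl (start + j) = "" := by
  have hdvd : (10:Int) ∣ start := (PySem.Int.mod_eq_zero_iff_dvd start 10).1 hs
  have hd : ¬ (10:Int) ∣ (start + j + 1) := by omega
  simp [pvNl, hd]

lemma pv_nl_nine (start : Int) (hs : PySem.Int.mod start 10 = 0) :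
    pvNl (start + 9) = "\n" := by
  have hdvd : (10:Int) ∣ start := (PySem.Int.mod_eq_zero_iff_dvd start 10).1 hs
  have hd : (10:Int) ∣ (start + 9 + 1) := by omega
  simp [pvNl, hd]

lemma pv_row_nl (start : Int) (hs : PySem.Int.mod start 10 = 0) :
    ∀ (chunk : List String) (j : Int), 0 ≤ j → j < 10 → j + (chunk.length : Int) ≤ 10 →
    PySem.Str.join "" ((PySem.List.enumerate chunk j).map
        (fun p => pvToken (start + p.1) p.2 ++ pvNl (start + p.1)))
      = PySem.Str.join "" ((PySem.List.enumerate chunk j).map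
          (fun p => pvToken (start + p.1) p.2))
        ++ (if j + (chunk.length : Int) = 10 then "\n" else "") := by
  intro chunk
  induction chunk with
  | nil =>
    intro j h0 h9 hle
    rw [if_neg (by simp; omega)]
    simp [PySem.List.enumerate_nil, pv_join0_nil, String.append_empty]
  | cons a cs ih =>
    intro j h0 h9 hle
    rw [PySem.List.enumerate_cons, List.map_cons, List.map_cons, pv_join0_cons, pv_join0_cons,
      show (j + (((a :: cs).length : Nat) : Int)) = (j + 1) + (cs.length : Int) by
        push_cast [List.length_cons]; ring]
    by_cases hj : j < 9
    · rw [pv_nl_small start j hs h0 hj, String.append_empty,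
        ih (j + 1) (by omega) (by omega) (by push_cast [List.length_cons] at hle ⊢; omega)]
      simp [String.append_assoc]
    · have hj9 : j = 9 := by omega
      subst hj9
      have hcs : cs = [] := by
        have hcl : (cs.length : Int) ≤ 0 := by push_cast [List.length_cons] at hle; omega
        exact List.eq_nil_of_length_eq_zero (by omega)
      subst hcs
      rw [pv_nl_nine start hs, if_pos (by norm_num)]
      simp [PySem.List.enumerate_nil, pv_join0_nil, String.append_empty, String.append_assoc]

theorem pv_rows_eq (l : List String) (start : Int) (hs : PySem.Int.mod start 10 = 0) :
    pvRows start l = PySem.Str.join "" ((PySem.List.enumerate l start).map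
      (fun p => pvToken p.1 p.2 ++ pvNl p.1)) := by
  rw [pvRows]
  by_cases hnil : l = []
  · simp [hnil, PySem.List.enumerate_nil, pv_join0_nil]
  · rw [dif_neg hnil]
    show (if (l.take 10).length = 10
          then PySem.Str.join "" ((PySem.List.enumerate (l.take 10)).map
                (fun p => pvToken (start + p.1) p.2)) ++ "\n"
          else PySem.Str.join "" ((PySem.List.enumerate (l.take 10)).map
                (fun p => pvToken (start + p.1) p.2)))
        ++ pvRows (start + 10) (l.drop 10)
      = PySem.Str.join "" ((PySem.List.enumerate l start).map (fun p => pvToken p.1 p.2 ++ pvNl p.1))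
    conv_rhs => rw [← List.take_append_drop 10 l, PySem.List.enumerate_append,
      List.map_append, pv_join0_append]
    have he := pv_enum_shift (l.take 10) start 0
    rw [add_zero] at he
    rw [he, List.map_map]
    simp only [Function.comp_def]
    rw [pv_row_nl start hs (l.take 10) 0 le_rfl (by norm_num)
      (by simp [List.length_take] <;> omega)]
    rcases Nat.lt_or_ge l.length 10 with hsm | hbg
    · have hdrop : l.drop 10 = [] := List.drop_eq_nil_iff.mpr (by omega)
      rw [hdrop, if_neg (show ¬ (l.take 10).length = 10 by simp [List.length_take] <;> omega),
        if_neg (show ¬ ((0:Int) + ((l.take 10).length : Int) = 10) by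
          simp [List.length_take] <;> omega)]
      rw [pvRows]
      simp [PySem.List.enumerate_nil, pv_join0_nil, String.append_empty]
    · have hlen : (l.take 10).length = 10 := by simp [List.length_take] <;> omega
      rw [hlen, if_pos rfl]
      rw [pv_rows_eq (l.drop 10) (start + 10)
        ((PySem.Int.mod_eq_zero_iff_dvd _ _).2 (by
          have := (PySem.Int.mod_eq_zero_iff_dvd start 10).1 hs; omega))]
      push_cast
      simp [String.append_assoc]
termination_by l.length
decreasing_by
  simp only [List.length_drop]
  have : l.length ≠ 0 := fun hh => hnil (List.eq_nil_of_length_eq_zero hh)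
  omega

-- ===== VERDICT (by name: the statement is the Claim_ definition above) =====
theorem prettier_spec : Claim_equal_prettier := by
  intro l _
  unfold Spec_prettier prettier prettier_alt
  by_cases hbig : l.length > 20
  · rw [if_pos hbig, if_pos hbig, pv_stepA_eq, pv_foldl_append_join,
      pv_rows_eq l 0 (by decide), String.empty_append]
  · rw [if_neg hbig, if_neg hbig, pv_stepS_eq, pv_foldl_append_join, String.empty_append]
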